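-- pv_equiv track=rewrite | github.com/czaky/puzzles | grid.py | enclosed_islands_count
-- ===== SOURCE A (Python) =====
-- from itertools import product
--
-- def enclosed_islands_count(grid: list[list[int]]) -> int:
--     """Return the count of islands of 1s fully enclosed by 0s.
--
--     If an island touches the edge it is not considered fully enclosed.
--
--     Args:
--     ----
--         grid (List[List[int]]): a grid of 1s and 0s.
--
--     Returns:
--     -------
--         int: count of fully enclosed islands.
--
--     """
--     n, m = len(grid), len(grid[0])
--
--     # Idea is to do a graph DFS and mark the grid points as visited.
--     # This way we determine each point as belonging to an island.
--     # The DFS functions returns 3 values: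
--     #    0 - no new island,
--     #    1 - new fully enclosed island,
--     #    2 - new island touching an edge.
--     # The function below takes a `max` of the values.
--
--     def v(x: int, y: int) -> int:
--         # Check if (x, y) is valid and that it is an unexplored point.
--         if not (0 <= x < n and 0 <= y < m and grid[x][y] == 1):
--             return 0
--         grid[x][y] = 0
--         # Determine if this point touches the edge (=> 2)
--         t = 2 - (0 < x < n - 1 and 0 < y < m - 1)
--         # Visit all the adjacent points.
--         # Return 2 for an island touching the edge, 1 otherwise.
--         return max(t, v(x + 1, y), v(x - 1, y), v(x, y + 1), v(x, y - 1))
--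
--     # Sum only islands that are new and fully enclosed by 0s.
--     return sum(v(x, y) == 1 for x, y in product(range(n), range(m)))
-- ===== SOURCE B (Python) =====
-- def enclosed_islands_count(grid: list[list[int]]) -> int:
--     """Return the count of islands of 1s fully enclosed by 0s.
--
--     Iterative flood fill with an explicit stack (no recursion).
--     """
--     n, m = len(grid), len(grid[0])
--     count = 0
--     for x in range(n):
--         for y in range(m):
--             if grid[x][y] != 1:
--                 continue
--             best = 0
--             stack = [(x, y)]
--             while stack:
--                 i, j = stack.pop()
--                 if not (0 <= i < n and 0 <= j < m and grid[i][j] == 1):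
--                     continue
--                 grid[i][j] = 0
--                 t = 2 - (0 < i < n - 1 and 0 < j < m - 1)
--                 if t > best:
--                     best = t
--                 stack.extend(((i, j - 1), (i, j + 1), (i - 1, j), (i + 1, j)))
--             count += best == 1
--     return count
-- ===== Notes on version B (the rewrite author's own statement) =====
-- stated objective: alternative
-- what changed: A's recursive DFS closure (nested self-calls returning a max) is replaced by an iterative flood fill over an explicit stack inside plain nested loops, so B uses no recursion at all (and is immune to Python's recursion limit on large islands).
import Mathlib
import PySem

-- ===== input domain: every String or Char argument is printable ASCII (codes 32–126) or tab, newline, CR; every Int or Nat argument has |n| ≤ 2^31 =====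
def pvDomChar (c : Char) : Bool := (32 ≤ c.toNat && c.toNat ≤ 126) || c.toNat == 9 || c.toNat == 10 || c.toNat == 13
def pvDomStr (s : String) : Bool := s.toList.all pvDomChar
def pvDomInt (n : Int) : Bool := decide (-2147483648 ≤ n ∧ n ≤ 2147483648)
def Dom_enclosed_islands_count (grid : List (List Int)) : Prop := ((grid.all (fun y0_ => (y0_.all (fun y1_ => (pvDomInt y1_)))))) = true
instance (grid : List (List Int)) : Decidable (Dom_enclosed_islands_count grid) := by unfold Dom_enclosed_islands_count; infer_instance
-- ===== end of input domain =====

-- B replaces A's recursive DFS by an iterative explicit-stack flood fill (no recursion);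
-- equivalence is about the return value; both programs perform the same in-place zeroing of the grid.

-- ===== PORT A =====
-- shared low-level cell access (Python's grid[x][y] read / write; guards ensure in-range, nonneg)
def pvCell (g : List (List Int)) (x y : Int) : Int := (g.getD x.toNat []).getD y.toNat 0

def pvSet (g : List (List Int)) (x y v : Int) : List (List Int) :=
  g.set x.toNat ((g.getD x.toNat []).set y.toNat v)

-- number of 1-cells: the termination measure (Python needs none; fuel below is a totality guard only)
def pvOnes (g : List (List Int)) : Nat := (g.map (fun r => r.countP (fun a => a == 1))).sum

-- A's inner recursive function v, with fuel as totality guard (fuel ≥ pvOnes g always suffices,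
-- and the caller passes exactly pvOnes of the current grid); n, m are the closure variables.
def vF : Nat → Int → Int → List (List Int) → Int → Int → Int × List (List Int)
  | 0, _, _, g, _, _ => (0, g)
  | fuel+1, n, m, g, x, y =>
    if 0 ≤ x ∧ x < n ∧ 0 ≤ y ∧ y < m ∧ pvCell g x y = 1 then
      let g1 := pvSet g x y 0
      let t : Int := 2 - (if 0 < x ∧ x < n - 1 ∧ 0 < y ∧ y < m - 1 then (1:Int) else 0)
      let p1 := vF fuel n m g1 (x+1) y
      let p2 := vF fuel n m p1.2 (x-1) y
      let p3 := vF fuel n m p2.2 x (y+1)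
      let p4 := vF fuel n m p3.2 x (y-1)
      (max t (max p1.1 (max p2.1 (max p3.1 p4.1))), p4.2)
    else (0, g)

def enclosed_islands_count (grid : List (List Int)) : Int :=
  let n : Int := grid.length
  let m : Int := (grid.headD []).length
  -- itertools.product(range(n), range(m))
  let ps := (List.range grid.length).flatMap
      (fun x => (List.range (grid.headD []).length).map (fun y => ((x : Int), (y : Int))))
  -- sum(v(x, y) == 1 for x, y in product(...)), threading the mutated grid
  (ps.foldl (fun (s : Int × List (List Int)) xy =>
      let p := vF (pvOnes s.2) n m s.2 xy.1 xy.2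
      (s.1 + (if p.1 = 1 then (1:Int) else 0), p.2)) (0, grid)).1

-- ===== PORT B =====
-- termination lemmas for the stack loop (cited by decreasing_by)
theorem pvCell_bounds {g : List (List Int)} {x y : Int} (h : pvCell g x y = 1) :
    x.toNat < g.length ∧ y.toNat < (g.getD x.toNat []).length := by
  unfold pvCell at h
  have hx : x.toNat < g.length := by
    by_contra hx
    rw [List.getD_eq_default _ _ (Nat.le_of_not_lt hx)] at h
    simp at h
  refine ⟨hx, ?_⟩
  by_contra hy
  rw [List.getD_eq_default _ _ (Nat.le_of_not_lt hy)] at h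
  exact absurd h (by norm_num)

theorem countP_set_one {r : List Int} {j : Nat} (h : r.getD j 0 = 1) :
    (r.set j 0).countP (fun a => a == 1) + 1 = r.countP (fun a => a == 1) := by
  induction r generalizing j with
  | nil => simp [List.getD] at h
  | cons a tl ih =>
    cases j with
    | zero => simp [List.getD] at h; subst h; simp
    | succ j =>
      simp only [List.getD_cons_succ] at h
      simp only [List.set_cons_succ, List.countP_cons]
      have := ih h; omega

theorem ones_set_aux {g : List (List Int)} {i j : Nat} (hi : i < g.length)
    (h : g[i].getD j 0 = 1) :
    (List.map (fun r => r.countP (fun a => a == 1)) (g.set i (g[i].set j 0))).sum + 1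
      = (List.map (fun r => r.countP (fun a => a == 1)) g).sum := by
  induction g generalizing i with
  | nil => simp at hi
  | cons r tl ih =>
    cases i with
    | zero =>
      simp only [List.getElem_cons_zero] at h
      simp only [List.getElem_cons_zero, List.set_cons_zero, List.map_cons, List.sum_cons]
      have := countP_set_one h; omega
    | succ i =>
      simp only [List.getElem_cons_succ] at h
      simp only [List.getElem_cons_succ, List.set_cons_succ, List.map_cons, List.sum_cons]
      have := ih (by simpa using hi) h; omega

theorem pvOnes_set {g : List (List Int)} {x y : Int} (h : pvCell g x y = 1) :
    pvOnes (pvSet g x y 0) + 1 = pvOnes g := by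
  obtain ⟨hx, _⟩ := pvCell_bounds h
  have h' : g[x.toNat].getD y.toNat 0 = 1 := by
    unfold pvCell at h; rwa [List.getD_eq_getElem _ _ hx] at h
  unfold pvOnes pvSet
  rw [List.getD_eq_getElem _ _ hx]
  exact ones_set_aux hx h'

theorem pvOnes_set_lt {g : List (List Int)} {x y : Int} (h : pvCell g x y = 1) :
    pvOnes (pvSet g x y 0) < pvOnes g := by
  have := pvOnes_set h; omega

-- B's while-loop over an explicit stack; the list head is the stack top
-- (Python pops from the end and extends with the reversed neighbour tuple,
-- so the pop order is (x+1,y),(x-1,y),(x,y+1),(x,y-1), as written here).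
def sLoop (n m : Int) : List (List Int) → Int → List (Int × Int) → Int × List (List Int)
  | g, acc, [] => (acc, g)
  | g, acc, (x, y) :: rest =>
    if h : 0 ≤ x ∧ x < n ∧ 0 ≤ y ∧ y < m ∧ pvCell g x y = 1 then
      sLoop n m (pvSet g x y 0)
        (max acc (2 - (if 0 < x ∧ x < n - 1 ∧ 0 < y ∧ y < m - 1 then (1:Int) else 0)))
        ((x+1, y) :: (x-1, y) :: (x, y+1) :: (x, y-1) :: rest)
    else sLoop n m g acc rest
termination_by g _ st => (pvOnes g, st.length)
decreasing_by
  · exact Prod.Lex.left _ _ (pvOnes_set_lt h.2.2.2.2)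
  · exact Prod.Lex.right _ (by simp)

def enclosed_islands_count_alt (grid : List (List Int)) : Int :=
  let n : Int := grid.length
  let m : Int := (grid.headD []).length
  ((List.range grid.length).foldl (fun (s : Int × List (List Int)) x =>
      (List.range (grid.headD []).length).foldl (fun (s : Int × List (List Int)) y =>
        if pvCell s.2 (x : Int) (y : Int) = 1 then
          let p := sLoop n m s.2 0 [((x : Int), (y : Int))]
          (s.1 + (if p.1 = 1 then (1:Int) else 0), p.2)
        else s) s) (0, grid)).1

-- ===== PRECONDITION & SPEC =====
-- Pre_ excludes exactly the inputs on which Python A raises IndexError: the empty grid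
-- (len(grid[0])) and grids with a row shorter than row 0 (grid[x][y] for y < m).
def Pre_enclosed_islands_count (grid : List (List Int)) : Prop :=
  grid ≠ [] ∧ ∀ r ∈ grid, (grid.headD []).length ≤ r.length
instance (grid : List (List Int)) : Decidable (Pre_enclosed_islands_count grid) := by
  unfold Pre_enclosed_islands_count; infer_instance

def pvWitness_enclosed_islands_count : List (List Int) := [[0,0,0],[0,1,0],[0,0,0]]

def Spec_enclosed_islands_count (grid : List (List Int)) (out : Int) : Prop := out = enclosed_islands_count_alt grid
instance (grid : List (List Int)) (out : Int) : Decidable (Spec_enclosed_islands_count grid out) := by unfold Spec_enclosed_islands_count; infer_instance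

-- ===== CLAIM (what is proved, stated in full; the proofs are below) =====
def Claim_equal_enclosed_islands_count : Prop := ∀ (grid : List (List Int)), Dom_enclosed_islands_count grid → Pre_enclosed_islands_count grid → Spec_enclosed_islands_count grid (enclosed_islands_count grid)

-- ===== LEMMAS AND PROOFS =====

theorem pvOnes_pos {g : List (List Int)} {x y : Int} (h : pvCell g x y = 1) :
    1 ≤ pvOnes g := by
  have := pvOnes_set h; omega

-- the DFS never creates new 1-cells
theorem vF_ones_le (fuel : Nat) (n m : Int) :
    ∀ (g : List (List Int)) (x y : Int), pvOnes (vF fuel n m g x y).2 ≤ pvOnes g := by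
  induction fuel with
  | zero => intro g x y; simp [vF]
  | succ fuel ih =>
    intro g x y
    rw [vF]
    by_cases h : 0 ≤ x ∧ x < n ∧ 0 ≤ y ∧ y < m ∧ pvCell g x y = 1
    · rw [if_pos h]
      simp only []
      have h1 := pvOnes_set h.2.2.2.2
      exact le_trans (ih _ _ _) (le_trans (ih _ _ _) (le_trans (ih _ _ _)
        (le_trans (ih _ _ _) (by omega))))
    · rw [if_neg h]

-- the DFS result is nonnegative
theorem vF_nonneg (fuel : Nat) (n m : Int) (g : List (List Int)) (x y : Int) :
    0 ≤ (vF fuel n m g x y).1 := by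
  cases fuel with
  | zero => simp [vF]
  | succ fuel =>
    rw [vF]
    by_cases h : 0 ≤ x ∧ x < n ∧ 0 ≤ y ∧ y < m ∧ pvCell g x y = 1
    · rw [if_pos h]
      simp only []
      exact le_trans (by split_ifs <;> norm_num) (le_max_left _ _)
    · rw [if_neg h]

-- core simulation: pushing (x,y) on the stack behaves like one recursive call of v
theorem sLoop_vF (fuel : Nat) (n m : Int) :
    ∀ (g : List (List Int)) (acc x y : Int) (rest : List (Int × Int)),
      0 ≤ acc → pvOnes g ≤ fuel →
      sLoop n m g acc ((x, y) :: rest)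
        = sLoop n m (vF fuel n m g x y).2 (max acc (vF fuel n m g x y).1) rest := by
  induction fuel with
  | zero =>
    intro g acc x y rest hacc hfuel
    have hc : ¬ (0 ≤ x ∧ x < n ∧ 0 ≤ y ∧ y < m ∧ pvCell g x y = 1) := by
      intro h; have := pvOnes_pos h.2.2.2.2; omega
    rw [sLoop, dif_neg hc]
    simp [vF, max_eq_left hacc]
  | succ fuel ih =>
    intro g acc x y rest hacc hfuel
    by_cases h : 0 ≤ x ∧ x < n ∧ 0 ≤ y ∧ y < m ∧ pvCell g x y = 1
    · rw [sLoop, dif_pos h, vF, if_pos h]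
      simp only []
      have hset := pvOnes_set h.2.2.2.2
      have hg1 : pvOnes (pvSet g x y 0) ≤ fuel := by omega
      set t : Int := 2 - (if 0 < x ∧ x < n - 1 ∧ 0 < y ∧ y < m - 1 then (1:Int) else 0) with ht
      have hacc1 : 0 ≤ max acc t := le_trans hacc (le_max_left _ _)
      rw [ih _ _ _ _ _ hacc1 hg1]
      rw [ih _ _ _ _ _ (le_trans hacc1 (le_max_left _ _))
        (le_trans (vF_ones_le _ _ _ _ _ _) hg1)]
      rw [ih _ _ _ _ _ (le_trans hacc1 (le_trans (le_max_left _ _) (le_max_left _ _)))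
        (le_trans (vF_ones_le _ _ _ _ _ _) (le_trans (vF_ones_le _ _ _ _ _ _) hg1))]
      rw [ih _ _ _ _ _
        (le_trans hacc1 (le_trans (le_max_left _ _)
          (le_trans (le_max_left _ _) (le_max_left _ _))))
        (le_trans (vF_ones_le _ _ _ _ _ _) (le_trans (vF_ones_le _ _ _ _ _ _)
          (le_trans (vF_ones_le _ _ _ _ _ _) hg1)))]
      simp only [max_assoc]
    · rw [sLoop, dif_neg h, vF, if_neg h]
      simp [max_eq_left hacc]

-- one scan step of A equals one scan step of B
theorem step_eq (n m : Int) (s : Int × List (List Int)) (x y : Int) :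
    (if pvCell s.2 x y = 1 then
        (s.1 + (if (sLoop n m s.2 0 [(x, y)]).1 = 1 then (1:Int) else 0),
          (sLoop n m s.2 0 [(x, y)]).2)
      else s)
    = (s.1 + (if (vF (pvOnes s.2) n m s.2 x y).1 = 1 then (1:Int) else 0),
        (vF (pvOnes s.2) n m s.2 x y).2) := by
  by_cases hc : pvCell s.2 x y = 1
  · rw [if_pos hc, sLoop_vF (pvOnes s.2) n m s.2 0 x y [] le_rfl le_rfl]
    rw [sLoop, max_eq_right (vF_nonneg _ _ _ _ _ _)]
  · rw [if_neg hc]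
    have hv : vF (pvOnes s.2) n m s.2 x y = (0, s.2) := by
      cases hf : pvOnes s.2 with
      | zero => rw [vF]
      | succ k => rw [vF, if_neg (by intro h; exact hc h.2.2.2.2)]
    rw [hv]
    simp

-- foldl over a flatMap is a nested foldl
theorem foldl_flatMap_nested {α β σ : Type} (l : List α) (h : α → List β)
    (f : σ → β → σ) (init : σ) :
    (l.flatMap h).foldl f init = l.foldl (fun s a => (h a).foldl f s) init := by
  induction l generalizing init with
  | nil => rfl
  | cons a tl ih => simp [List.flatMap_cons, List.foldl_append, ih]

-- ===== VERDICT (by name: the statement is the Claim_ definition above) =====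
theorem enclosed_islands_count_spec : Claim_equal_enclosed_islands_count := by
  intro grid _ _
  unfold Spec_enclosed_islands_count enclosed_islands_count enclosed_islands_count_alt
  simp only []
  rw [foldl_flatMap_nested]
  congr 2
  funext s x
  rw [List.foldl_map]
  congr 1
  funext s' y
  exact (step_eq _ _ s' (x : Int) (y : Int)).symm
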